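-- pv_equiv track=rewrite | github.com/jsteng19/kalshi-research | src/parse_truth_rtf_and_merge.py | extract_content_after_marker
-- ===== SOURCE A (Python) =====
-- from typing import Iterable, List, Optional, Tuple
--
-- HEADER_NAME_LINE = "Donald Trump"
--
-- def extract_content_after_marker(block: List[str]) -> str:
--     """Extract content lines following 'View on Truth Social' or 'View Image' marker.
--
--     Joins soft-wrapped lines into paragraphs separated by blank lines. Returns
--     a normalized string with internal consecutive whitespace collapsed for cleanliness.
--     """
--     # Find the index of the marker line
--     marker_idx: Optional[int] = None
--     for idx, line in enumerate(block):
--         if line.strip() in {"View on Truth Social", "View Image"}: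
--             marker_idx = idx
--             break
--     if marker_idx is None:
--         return ""
--
--     # Lines after marker until the next header start belong to content.
--     content_lines = block[marker_idx + 1 :]
--
--     # Build paragraphs by treating contiguous non-empty lines as a paragraph
--     paragraphs: List[str] = []
--     current: List[str] = []
--     for raw_line in content_lines:
--         line = raw_line.rstrip()
--         if line.strip() == HEADER_NAME_LINE:
--             # Safety: encountered start of next block due to missing blank
--             break
--         if line.strip() == "":
--             if current:
--                 paragraphs.append(" ".join(s.strip() for s in current if s.strip()))
--                 current = []
--             # else multiple blank lines collapse
--         else:
--             current.append(line)
--     if current: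
--         paragraphs.append(" ".join(s.strip() for s in current if s.strip()))
--
--     # Join paragraphs with double newlines; then strip
--     content = "\n\n".join(p for p in paragraphs if p)
--     return content.strip()
-- ===== SOURCE B (Python) =====
-- HEADER_NAME_LINE = "Donald Trump"
--
-- def extract_content_after_marker(block):
--     """Recursive formulation: paragraphs are built back-to-front by structural
--     recursion on the tail, merging a non-blank head line into the first
--     paragraph of the rest when no blank/header line separates them; no mutable
--     accumulator or flush state."""
--     for i, line in enumerate(block):
--         if line.strip() in {"View on Truth Social", "View Image"}:
--             return "\n\n".join(_paras(block[i + 1:])).strip()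
--     return ""
--
-- def _paras(lines):
--     if not lines:
--         return []
--     s = lines[0].strip()
--     if s == HEADER_NAME_LINE:
--         return []
--     rest = lines[1:]
--     if s == "":
--         return _paras(rest)
--     ps = _paras(rest)
--     if rest and rest[0].strip() not in ("", HEADER_NAME_LINE) and ps:
--         return [s + " " + ps[0]] + ps[1:]
--     return [s] + ps
-- ===== Notes on version B (the rewrite author's own statement) =====
-- stated objective: alternative
-- what changed: Replaced A's forward single-pass state machine (mutable current/paragraphs buffers flushed on blank lines, header break and end-of-input) by a pure structural recursion that builds the paragraph list back-to-front, merging a non-blank head line into the first paragraph of the recursively built tail when no blank or header line separates them.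
import Mathlib
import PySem

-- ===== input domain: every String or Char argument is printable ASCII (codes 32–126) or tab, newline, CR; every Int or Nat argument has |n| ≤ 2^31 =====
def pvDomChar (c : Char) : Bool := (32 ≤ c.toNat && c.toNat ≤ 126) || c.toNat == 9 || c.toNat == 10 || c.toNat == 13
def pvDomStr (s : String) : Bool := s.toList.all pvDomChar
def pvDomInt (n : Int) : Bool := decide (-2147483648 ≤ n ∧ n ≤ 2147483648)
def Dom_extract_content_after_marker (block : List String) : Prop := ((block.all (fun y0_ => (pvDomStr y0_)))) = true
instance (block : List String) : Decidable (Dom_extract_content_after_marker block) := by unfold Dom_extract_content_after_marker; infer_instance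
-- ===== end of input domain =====

-- B replaces A's forward accumulator/flush state machine by a structural recursion
-- that builds the paragraph list back-to-front, merging a non-blank head line into
-- the first paragraph of the tail (objective: alternative decomposition; same cost).

-- ===== PORT A =====
-- the `for idx, line in enumerate(block): … break` marker search
def aFindMarker : List String → Nat → Option Nat
  | [], _ => none
  | line :: rest, idx =>
    if PySem.Str.strip line == "View on Truth Social" || PySem.Str.strip line == "View Image"
    then some idx else aFindMarker rest (idx + 1)

-- " ".join(s.strip() for s in current if s.strip())
def aMkPara (current : List String) : String :=
  PySem.Str.join " "
    ((current.filter (fun s => !(PySem.Str.strip s == ""))).map PySem.Str.strip)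

-- the `for raw_line in content_lines` loop (with its `break`) plus the trailing flush
def aLoop : List String → List String → List String → List String
  | [], paragraphs, current =>
      if current.isEmpty then paragraphs else paragraphs ++ [aMkPara current]
  | raw_line :: rest, paragraphs, current =>
      let line := PySem.Str.rstrip raw_line
      if PySem.Str.strip line == "Donald Trump" then
        (if current.isEmpty then paragraphs else paragraphs ++ [aMkPara current])
      else if PySem.Str.strip line == "" then
        (if current.isEmpty then aLoop rest paragraphs current
         else aLoop rest (paragraphs ++ [aMkPara current]) [])
      else aLoop rest paragraphs (current ++ [line])

def extract_content_after_marker (block : List String) : String :=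
  match aFindMarker block 0 with
  | none => ""
  | some marker_idx =>
    let content_lines := PySem.List.slice block (some ((marker_idx : Int) + 1)) none
    let paragraphs := aLoop content_lines [] []
    let content := PySem.Str.join "\n\n" (paragraphs.filter (fun p => !(p == "")))
    PySem.Str.strip content

-- ===== PORT B =====
-- _paras: structural recursion; `[s + " " + ps[0]] + ps[1:]` is the first match arm
def bParas : List String → List String
  | [] => []
  | l :: rest =>
    let s := PySem.Str.strip l
    if s == "Donald Trump" then []
    else if s == "" then bParas rest
    else
      match rest, bParas rest with
      | r :: _, p :: t =>
        if !(PySem.Str.strip r == "") && !(PySem.Str.strip r == "Donald Trump")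
        then (s ++ " " ++ p) :: t
        else s :: p :: t
      | _, ps => s :: ps

-- the marker loop with its early `return`; `block[i+1:]` is the remaining tail `rest`
def bFindTail : List String → Option (List String)
  | [] => none
  | line :: rest =>
    if PySem.Str.strip line == "View on Truth Social" || PySem.Str.strip line == "View Image"
    then some rest else bFindTail rest

def extract_content_after_marker_alt (block : List String) : String :=
  match bFindTail block with
  | some tail => PySem.Str.strip (PySem.Str.join "\n\n" (bParas tail))
  | none => ""

-- ===== PRECONDITION & SPEC =====
def Spec_extract_content_after_marker (block : List String) (out : String) : Prop := out = extract_content_after_marker_alt block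
instance (block : List String) (out : String) : Decidable (Spec_extract_content_after_marker block out) := by unfold Spec_extract_content_after_marker; infer_instance

-- ===== CLAIM (what is proved, stated in full; the proofs are below) =====
def Claim_equal_extract_content_after_marker : Prop := ∀ (block : List String), Dom_extract_content_after_marker block → Spec_extract_content_after_marker block (extract_content_after_marker block)

-- ===== LEMMAS AND PROOFS =====

-- reference paragraph builder over already-stripped, header-free lines
def Q : List String → List String → List String
  | current, [] => if current.isEmpty then [] else [PySem.Str.join " " current]
  | current, s :: rest =>
    if s == "" then
      (if current.isEmpty then Q [] rest else PySem.Str.join " " current :: Q [] rest)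
    else Q (current ++ [s]) rest

theorem aFind_shift (l : List String) (i : Nat) :
    aFindMarker l i = (aFindMarker l 0).map (· + i) := by
  induction l generalizing i with
  | nil => rfl
  | cons x t ih =>
    simp only [aFindMarker]
    by_cases h : (PySem.Str.strip x == "View on Truth Social"
        || PySem.Str.strip x == "View Image") = true
    · simp [h]
    · rw [if_neg h, if_neg h, ih (i + 1), ih 1, Option.map_map]
      cases aFindMarker t 0 <;> simp [Nat.add_comm, Nat.add_left_comm]

theorem find_tail (l : List String) :
    bFindTail l = (aFindMarker l 0).map (fun i => l.drop (i + 1)) := by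
  induction l with
  | nil => rfl
  | cons x t ih =>
    simp only [aFindMarker, bFindTail]
    by_cases h : (PySem.Str.strip x == "View on Truth Social"
        || PySem.Str.strip x == "View Image") = true
    · simp [h]
    · rw [if_neg h, if_neg h, ih, aFind_shift t 1, Option.map_map]
      cases aFindMarker t 0 <;> simp

theorem dropWhile_idem {α : Type} (p : α → Bool) (l : List α) :
    List.dropWhile p (List.dropWhile p l) = List.dropWhile p l := by
  induction l with
  | nil => rfl
  | cons x t ih =>
    by_cases h : p x = true
    · simp [h, ih]
    · simp [h]

theorem lstrip_rstrip_comm (l : List Char) :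
    PySem.Chars.lstrip (PySem.Chars.rstrip l) = PySem.Chars.rstrip (PySem.Chars.lstrip l) := by
  induction l with
  | nil => rfl
  | cons c t ih =>
    simp only [PySem.Chars.lstrip, PySem.Chars.rstrip] at *
    by_cases hpc : PySem.Chars.isspace c = true
    · by_cases hnil : t.reverse.dropWhile PySem.Chars.isspace = []
      · have hall : ∀ x ∈ t.reverse, PySem.Chars.isspace x = true :=
          List.dropWhile_eq_nil_iff.mp hnil
        have ht : t.dropWhile PySem.Chars.isspace = [] :=
          List.dropWhile_eq_nil_iff.mpr (fun x hx => hall x (List.mem_reverse.mpr hx))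
        simp [List.reverse_cons, List.dropWhile_append, hnil, hpc, ht]
      · simp only [List.reverse_cons, List.dropWhile_append, List.isEmpty_iff, hnil,
          if_false, List.reverse_append, List.reverse_cons, List.reverse_nil,
          List.nil_append, List.singleton_append, List.dropWhile_cons, hpc, if_true]
        simpa [List.dropWhile_cons, hpc] using ih
    · simp only [List.reverse_cons, List.dropWhile_append, List.dropWhile_cons, hpc,
        Bool.false_eq_true, if_false]
      by_cases hnil : t.reverse.dropWhile PySem.Chars.isspace = []
      · simp [hnil, hpc]
      · simp [List.isEmpty_iff, hnil, hpc]

theorem strip_rstrip_chars (l : List Char) :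
    PySem.Chars.strip (PySem.Chars.rstrip l) = PySem.Chars.strip l := by
  simp only [PySem.Chars.strip]
  rw [lstrip_rstrip_comm]
  simp [PySem.Chars.rstrip, PySem.Chars.lstrip, List.reverse_reverse, dropWhile_idem]

theorem strip_rstrip (s : String) :
    PySem.Str.strip (PySem.Str.rstrip s) = PySem.Str.strip s := by
  simp only [PySem.Str.strip, PySem.Str.toList_rstrip, strip_rstrip_chars]

theorem join_ne_empty (x : String) (xs : List String) (hx : ¬ x = "") :
    ¬ PySem.Str.join " " (x :: xs) = "" := by
  intro h
  have h' : (PySem.Str.join " " (x :: xs)).toList = [] := String.toList_eq_nil_iff.mpr h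
  rw [PySem.Str.toList_join] at h'
  have hxl : x.toList ≠ [] := fun hh => hx (String.toList_eq_nil_iff.mp hh)
  cases xs with
  | nil =>
    simp [PySem.Chars.join, List.intercalate] at h'
    exact hx h'
  | cons y ys =>
    simp [PySem.Chars.join, List.intercalate] at h'

theorem join_single (x : String) : PySem.Str.join " " [x] = x := by
  apply String.toList_inj.mp
  simp [PySem.Chars.join_singleton]

theorem join_cons_cons (x y : String) (t : List String) :
    PySem.Str.join " " (x :: y :: t) = x ++ " " ++ PySem.Str.join " " (y :: t) := by
  apply String.toList_inj.mp
  simp [PySem.Chars.join_cons_cons]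

-- elements of A's filtered-and-stripped accumulator are never the empty string
theorem cur'_ne (current : List String) :
    ∀ y ∈ (current.filter (fun s => !(PySem.Str.strip s == ""))).map PySem.Str.strip,
      ¬ y = "" := by
  intro y hy
  rcases List.mem_map.mp hy with ⟨s, hs, rfl⟩
  have := (List.mem_filter.mp hs).2
  simpa using this

-- the trailing flush of A, seen through the empty-paragraph filter, is Q _ []
theorem QA_flush (paragraphs current : List String) :
    (if current.isEmpty then paragraphs else paragraphs ++ [aMkPara current]).filter
        (fun p => !(p == "")) =
      paragraphs.filter (fun p => !(p == "")) ++
        Q ((current.filter (fun s => !(PySem.Str.strip s == ""))).map PySem.Str.strip) [] := by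
  cases current with
  | nil => simp [Q]
  | cons c t =>
    simp only [List.isEmpty_cons]
    set cur' := (((c :: t).filter (fun s => !(PySem.Str.strip s == ""))).map PySem.Str.strip)
      with hcur'
    cases hc : cur' with
    | nil =>
      have : aMkPara (c :: t) = "" := by
        simp only [aMkPara, ← hcur', hc]
        rfl
      simp [Q, this, List.filter_append]
    | cons x xs =>
      have hx : ¬ x = "" := cur'_ne (c :: t) x (by rw [← hcur', hc]; exact List.mem_cons_self ..)
      have hmk : aMkPara (c :: t) = PySem.Str.join " " cur' := by
        simp [aMkPara, hcur']
      simp [Q, hc, hmk, List.filter_append, join_ne_empty x xs hx]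

theorem Q_run (rest : List String) (current : List String) (h : ¬ current = []) :
    Q current rest =
      PySem.Str.join " " (current ++ rest.takeWhile (fun t => !(t == ""))) ::
        Q [] (rest.dropWhile (fun t => !(t == ""))) := by
  induction rest generalizing current with
  | nil => simp [Q, List.isEmpty_iff, h]
  | cons t ts ih =>
    by_cases ht : (t == "") = true
    · simp [Q, ht, List.isEmpty_iff, h]
    · have h2 : ¬ (current ++ [t]) = [] := by simp
      simp only [Q, ht, Bool.false_eq_true, if_false, ih (current ++ [t]) h2,
        List.takeWhile_cons, List.dropWhile_cons, Bool.not_false, if_true,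
        List.append_assoc, List.singleton_append]

theorem QA (ls paragraphs current : List String) :
    (aLoop ls paragraphs current).filter (fun p => !(p == "")) =
      paragraphs.filter (fun p => !(p == "")) ++
        Q ((current.filter (fun s => !(PySem.Str.strip s == ""))).map PySem.Str.strip)
          ((ls.map PySem.Str.strip).takeWhile (fun s => !(s == "Donald Trump"))) := by
  induction ls generalizing paragraphs current with
  | nil => simpa [aLoop] using QA_flush paragraphs current
  | cons raw rest ih =>
    simp only [aLoop, strip_rstrip, List.map_cons, List.takeWhile_cons]
    by_cases h1 : (PySem.Str.strip raw == "Donald Trump") = true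
    · simp only [h1, if_true, Bool.not_true, Bool.false_eq_true]
      exact QA_flush paragraphs current
    · simp only [h1, Bool.false_eq_true, if_false, Bool.not_false, if_true]
      by_cases h2 : (PySem.Str.strip raw == "") = true
      · have hraw : PySem.Str.strip raw = "" := by simpa using h2
        simp only [h2, if_true]
        cases current with
        | nil =>
          rw [if_pos (List.isEmpty_nil : ([] : List String).isEmpty = true), ih]
          simp [Q, hraw]
        | cons c t =>
          rw [if_neg (by simp), ih]
          set cur' := (((c :: t).filter (fun s => !(PySem.Str.strip s == ""))).map
            PySem.Str.strip) with hcur'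
          cases hc : cur' with
          | nil =>
            have hmk : aMkPara (c :: t) = "" := by
              simp only [aMkPara, ← hcur', hc]; rfl
            simp [hmk, List.filter_append, Q, hraw]
          | cons x xs =>
            have hx : ¬ x = "" := cur'_ne (c :: t) x
              (by rw [← hcur', hc]; exact List.mem_cons_self ..)
            have hmk : aMkPara (c :: t) = PySem.Str.join " " cur' := by
              simp [aMkPara, hcur']
            simp [hmk, List.filter_append, Q, hraw, hc, join_ne_empty x xs hx,
              List.append_assoc]
      · simp only [h2, Bool.false_eq_true, if_false]
        rw [ih]
        have hfilt : ((current ++ [PySem.Str.rstrip raw]).filter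
              (fun s => !(PySem.Str.strip s == ""))).map PySem.Str.strip =
            ((current.filter (fun s => !(PySem.Str.strip s == ""))).map PySem.Str.strip)
              ++ [PySem.Str.strip raw] := by
          simp [List.filter_append, strip_rstrip, h2]
        rw [hfilt]
        congr 1
        generalize ((current.filter (fun s => !(PySem.Str.strip s == ""))).map
          PySem.Str.strip) = cs
        simp [Q, h2]

-- B's back-to-front recursion computes the same paragraph list as the
-- forward reference builder Q on the stripped, header-truncated lines
theorem QB (ls : List String) :
    bParas ls =
      Q [] ((ls.map PySem.Str.strip).takeWhile (fun s => !(s == "Donald Trump"))) := by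
  induction ls with
  | nil => rfl
  | cons l rest ih =>
    simp only [bParas, List.map_cons, List.takeWhile_cons]
    by_cases h1 : (PySem.Str.strip l == "Donald Trump") = true
    · simp [h1, Q]
    · simp only [h1, Bool.false_eq_true, if_false, Bool.not_false, if_true]
      by_cases h2 : (PySem.Str.strip l == "") = true
      · have hl : PySem.Str.strip l = "" := by simpa using h2
        simp [Q, hl, ih]
      · have hQcons : Q [] (PySem.Str.strip l ::
            ((rest.map PySem.Str.strip).takeWhile (fun s => !(s == "Donald Trump")))) =
            Q [PySem.Str.strip l]
              ((rest.map PySem.Str.strip).takeWhile (fun s => !(s == "Donald Trump"))) := by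
          simp [Q, h2]
        rw [if_neg (by simpa using h2), hQcons]
        cases rest with
        | nil => simp [bParas, Q, join_single]
        | cons r t =>
          by_cases hrh : (PySem.Str.strip r == "Donald Trump") = true
          · have hps : bParas (r :: t) = [] := by simp [bParas, hrh]
            have hL : ((r :: t).map PySem.Str.strip).takeWhile
                (fun s => !(s == "Donald Trump")) = [] := by
              simp [hrh]
            rw [hL, hps]
            simp [Q, join_single]
          · by_cases hrb : (PySem.Str.strip r == "") = true
            · have hr : PySem.Str.strip r = "" := by simpa using hrb
              have hL : ((r :: t).map PySem.Str.strip).takeWhile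
                  (fun s => !(s == "Donald Trump")) =
                  "" :: ((t.map PySem.Str.strip).takeWhile
                    (fun s => !(s == "Donald Trump"))) := by
                simp [hr]
              rw [hL] at ih ⊢
              have hQblank : Q [PySem.Str.strip l]
                  ("" :: ((t.map PySem.Str.strip).takeWhile
                    (fun s => !(s == "Donald Trump")))) =
                  PySem.Str.strip l :: Q []
                    ((t.map PySem.Str.strip).takeWhile
                      (fun s => !(s == "Donald Trump"))) := by
                simp [Q, join_single]
              rw [hQblank]
              have hps : bParas (r :: t) = Q []
                  ((t.map PySem.Str.strip).takeWhile (fun s => !(s == "Donald Trump"))) := by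
                rw [ih]; simp [Q]
              rw [hps] at ih ⊢
              rcases hc2 : Q [] ((t.map PySem.Str.strip).takeWhile
                  (fun s => !(s == "Donald Trump"))) with _ | ⟨p, ps⟩
              · simp
              · simp [hrb]
            · have hL : ((r :: t).map PySem.Str.strip).takeWhile
                  (fun s => !(s == "Donald Trump")) =
                  PySem.Str.strip r :: ((t.map PySem.Str.strip).takeWhile
                    (fun s => !(s == "Donald Trump"))) := by
                simp [hrh]
              rw [hL] at ih ⊢
              have hQr : Q [] (PySem.Str.strip r :: ((t.map PySem.Str.strip).takeWhile
                    (fun s => !(s == "Donald Trump")))) =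
                  Q [PySem.Str.strip r] ((t.map PySem.Str.strip).takeWhile
                    (fun s => !(s == "Donald Trump"))) := by
                simp [Q, hrb]
              rw [hQr] at ih
              rw [Q_run _ [PySem.Str.strip r] (by simp)] at ih
              have hQsr : Q [PySem.Str.strip l] (PySem.Str.strip r ::
                  ((t.map PySem.Str.strip).takeWhile (fun s => !(s == "Donald Trump")))) =
                  Q [PySem.Str.strip l, PySem.Str.strip r]
                    ((t.map PySem.Str.strip).takeWhile (fun s => !(s == "Donald Trump"))) := by
                simp [Q, hrb]
              rw [hQsr, Q_run _ [PySem.Str.strip l, PySem.Str.strip r] (by simp)]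
              rw [ih]
              simp [hrb, hrh, join_cons_cons]

-- ===== VERDICT (by name: the statement is the Claim_ definition above) =====
theorem extract_content_after_marker_spec : Claim_equal_extract_content_after_marker := by
  intro block _
  unfold Spec_extract_content_after_marker
  unfold extract_content_after_marker extract_content_after_marker_alt
  rw [find_tail]
  cases h : aFindMarker block 0 with
  | none => rfl
  | some i =>
    simp only [Option.map_some]
    have hslice : PySem.List.slice block (some ((i : Int) + 1)) none = block.drop (i + 1) := by
      have : ((i : Int) + 1) = ((i + 1 : Nat) : Int) := by push_cast; ring
      rw [this, PySem.List.slice_from_natCast]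
    rw [hslice, QA, QB]
    rfl
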